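/- GENERATED by mk_final_copies.py from the proof of the farm's unit `vorbis_pump_first_frame` (farm:vorbis_pump_first_frame.1: Lemmas.lean) as the
   re-elaboration sweep compiled it — do not edit. -/
import Asan.CheckWalk
import Vorbis.Spec.Units.vorbis_pump_first_frame

/-!
  Pure lemmas (no machine steps) for the unit `vorbis_pump_first_frame`: the protected-frame prologue and epilogue as facts
  about memories, and the arithmetic of the three frame objects `len`, `right`, `left`.
-/

open X86 X86.User Asan Vorbis Vorbis.Spec

set_option maxRecDepth 4000
set_option maxHeartbeats 4000000

namespace Vorbis.Spec.vorbis_pump_first_frame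

/-- The frame's base `RA − 120` as a number: the word subtraction does not wrap for a stack pointer. -/
theorem toNat_sub120 (sp : Word) (h : 120 ≤ sp.toNat) : (sp - 120).toNat = sp.toNat - 120 := by
  u_omega

/-- The address of the prologue's / epilogue's inline shadow store number 0: `rbx + 0xC00000` with `rbx = base >> 3`. -/
theorem slot0 (b : Word) (hb : b.toNat < 0x800000) : b >>> 3 + 12582912 = shadowAddr (b.toNat / 8 + 0) := by
  apply eq_shadowAddr
  have h3 := Asan.toNat_shr3 b
  rw [UInt64.toNat_add, h3]
  simp only [UInt64.reduceToNat]
  omega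

/-- The address of the inline shadow store at index 4: `rbx + 0xC00004`. -/
theorem slot4 (b : Word) (hb : b.toNat < 0x800000) : b >>> 3 + 12582916 = shadowAddr (b.toNat / 8 + 4) := by
  apply eq_shadowAddr
  have h3 := Asan.toNat_shr3 b
  rw [UInt64.toNat_add, h3]
  simp only [UInt64.reduceToNat]
  omega

/-- The address of the inline shadow store at index 8: `rbx + 0xC00008`. -/
theorem slot8 (b : Word) (hb : b.toNat < 0x800000) : b >>> 3 + 12582920 = shadowAddr (b.toNat / 8 + 8) := by
  apply eq_shadowAddr
  have h3 := Asan.toNat_shr3 b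
  rw [UInt64.toNat_add, h3]
  simp only [UInt64.reduceToNat]
  omega

/-- **The three inline shadow stores of the prologue** (0x11386c, 0x113876, 0x113880), as the walker writes them, are the
layout's `storesMem … prologue`. -/
theorem prologue_stores (M : Mem) (b : Word) (hb : b.toNat < 0x800000) :
    ((M.writeLE (b >>> 3 + 12582912) 4 4059165169).writeLE (b >>> 3 + 12582916) 4 4060410372).writeLE
        (b >>> 3 + 12582920) 4 4092850948 =
      storesMem M (b.toNat / 8) Vorbis.Frames.vorbis_pump_first_frame.prologue := by
  rw [slot0 b hb, slot4 b hb, slot8 b hb]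
  rfl

/-- **The two inline shadow stores of the epilogue** (0x1138a4, 0x1138af), as the walker writes them, are the layout's
`storesMem … epilogue`. -/
theorem epilogue_stores (M : Mem) (b : Word) (hb : b.toNat < 0x800000) :
    (M.writeLE (b >>> 3 + 12582912) 8 0).writeLE (b >>> 3 + 12582920) 4 0 =
      storesMem M (b.toNat / 8) Vorbis.Frames.vorbis_pump_first_frame.epilogue := by
  rw [slot0 b hb, slot8 b hb]
  rfl

/-! ### The shadow layer over the prologue and the epilogue -/

/-- **AFTER THE PROLOGUE** (0x113840 … 0x113880) **AND THE `call` AT 0x113899**: three pushes, the three header words of the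
frame, the three inline shadow stores, the return address of the call. The layer holds with the function's own frame
`(RA − 120, Vorbis.Frames.vorbis_pump_first_frame)` in front, the clean stack ending at `RA − 120` (the body's stack pointer). The
memory is spelled as the walker's `w_mem` spells it. -/
theorem prologue_inv {others : List Obj} {frames : List (Nat × FrameLayout)} {mem : Mem} {sp : Word} (x1 x2 x3 ra : Nat)
    (h : ShadowInv others frames (sp.toNat + 8) mem) (hroom : 0x700000 + 4176 ≤ sp.toNat) (h8 : sp.toNat % 8 = 0) :
    ShadowInv others ((sp.toNat - 120, Vorbis.Frames.vorbis_pump_first_frame) :: frames) (sp.toNat - 120)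
      ((((((((((mem.writeLE (sp - 8) 8 x1).writeLE (sp - 16) 8 x2).writeLE (sp - 24) 8 x3).writeLE
        (sp - 120) 8 1102416563).writeLE (sp - 112) 8 1183104).writeLE (sp - 104) 8 1128512).writeLE
        ((sp - 120) >>> 3 + 12582912) 4 4059165169).writeLE ((sp - 120) >>> 3 + 12582916) 4 4060410372).writeLE
        ((sp - 120) >>> 3 + 12582920) 4 4092850948).writeLE (sp - 128) 8 ra) := by
  have hhi := h.stack.hi
  have e120 : (sp - 120).toNat = sp.toNat - 120 := toNat_sub120 sp (by omega)
  -- the return address of the call: a store outside the shadow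
  refine ShadowInv.writeLE ?_ _ _ _ (by u_omega) (by u_omega)
  -- the three shadow stores are the layout's prologue
  rw [prologue_stores _ _ (by omega), e120]
  -- the six stores before them go to the stack
  have h1 := h.writeLE (sp - 8) 8 x1 (by u_omega) (by u_omega)
  have h2 := h1.writeLE (sp - 16) 8 x2 (by u_omega) (by u_omega)
  have h3 := h2.writeLE (sp - 24) 8 x3 (by u_omega) (by u_omega)
  have h4 := h3.writeLE (sp - 120) 8 1102416563 (by u_omega) (by u_omega)
  have h5 := h4.writeLE (sp - 112) 8 1183104 (by u_omega) (by u_omega)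
  have h6 := h5.writeLE (sp - 104) 8 1128512 (by u_omega) (by u_omega)
  exact h6.prologue_ra Vorbis.Frames.vorbis_pump_first_frame_ok h8 (Nat.le_refl _) (by omega) (by omega)

/-- **`b` is the shadow index of the frame's base**: what `mov rbx, rsp ; shr rbx, 3` (0x11384b, 0x113868) computed from the
body's stack pointer `RA − 120`. A definition, so that `u_omega` does not see the shift (it keeps every arithmetic hypothesis,
and `omega` does not get through `>>> 3` next to the other word operations): the walk goes on with `b` and the two bounds. -/
def IsBase (sp b : Word) : Prop := (sp - 120) >>> 3 = b

/-- The shadow index of the frame's base lies in the shadow of the stack region. -/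
theorem isBase_bounds (sp : Word) (hroom : 0x700000 + 4176 ≤ sp.toNat) (hhi : sp.toNat + 8 ≤ 0x800000) :
    0xE0000 ≤ ((sp - 120) >>> 3).toNat ∧ ((sp - 120) >>> 3).toNat < 0x100000 := by
  rw [Asan.toNat_shr3, toNat_sub120 sp (by omega)]
  omega

/-- **AFTER THE EPILOGUE** (0x1138a4, 0x1138af): the frame is popped, the clean stack ends at `RA + 8` again (the stack pointer
after the `ret`). `hfr`: the callers' protected frames lie above (from the entry's `StackOK.active`). -/
theorem epilogue_inv {others : List Obj} {frames : List (Nat × FrameLayout)} {mem : Mem} {sp b : Word} {top' : Nat}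
    (hb : IsBase sp b)
    (h : ShadowInv others ((sp.toNat - 120, Vorbis.Frames.vorbis_pump_first_frame) :: frames) top' mem)
    (hroom : 0x700000 + 4176 ≤ sp.toNat) (h8 : sp.toNat % 8 = 0) (hhi : sp.toNat + 8 ≤ 0x800000)
    (hfr : ∀ bF, bF ∈ frames → sp.toNat + 8 ≤ bF.1) :
    ShadowInv others frames (sp.toNat + 8) ((mem.writeLE (b + 12582912) 8 0).writeLE (b + 12582920) 4 0) := by
  have e120 : (sp - 120).toNat = sp.toNat - 120 := toNat_sub120 sp (by omega)
  unfold IsBase at hb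
  rw [← hb, epilogue_stores _ _ (by omega), e120]
  exact ShadowInv.epilogue_ra (F := Vorbis.Frames.vorbis_pump_first_frame) (top := sp.toNat) h h8 hhi hfr

/-- The callers' protected frames lie at or above the clean stack's end. -/
theorem frames_above {others : List Obj} {frames : List (Nat × FrameLayout)} {mem : Mem} {top : Nat}
    (h : ShadowInv others frames top mem) : ∀ bF, bF ∈ frames → top ≤ bF.1 := by
  intro bF hbF
  obtain ⟨_, _, k3, _, _⟩ := h.stack.active bF hbF
  exact k3

/-! ### The decode-time invariant over stores to the stack and to the shadow -/

/-- **`DecodeInv` under another list of frames, over stores that went to the stack region and to the shadow only** (the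
prologue, the return address of a call, the epilogue): no allocated block is met (`BlkOK.inside`, `DecodeInv.offStack`), so
`DecodeInv.carry` applies. -/
theorem carry_stack_shadow {others : List Obj} {frames frames' : List (Nat × FrameLayout)} {len : Nat} {A : Arena}
    {stored room : Int} {ysz : Nat → Nat} {mem mem' : Mem} {f top0 top lo hi : Nat}
    (h : DecodeInv others frames len A stored room ysz mem f) (hinv0 : ShadowInv others frames top0 mem)
    (hlo : 0x700000 ≤ lo) (hhi : hi ≤ 0x800000)
    (hs : Mem.SameExcept [⟨lo, hi⟩, ⟨0xC00000, 0xE00000⟩] mem mem')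
    (hinv : ShadowInv others frames' top mem') : DecodeInv others frames' len A stored room ysz mem' f := by
  refine h.carry hinv0 (AllKept.of_sameExcept h.ok hs ?_) hinv
  intro B hB w hw
  have hin := h.ok.inside B hB
  have hoff := h.offStack B hB
  simp only [List.mem_cons, List.not_mem_nil, or_false] at hw
  rcases hw with rfl | rfl
  · simp only []
    omega
  · simp only []
    omega

/-! ### The three frame objects -/

/-- `len` (base + 32, 4 bytes) is a live object of the frame list with the function's own frame in front. -/
theorem live_len (others : List Obj) (frames : List (Nat × FrameLayout)) (base : Nat) :
    LiveIn others ((base, Vorbis.Frames.vorbis_pump_first_frame) :: frames) (base + 32) 4 := by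
  refine ⟨⟨base + 32, 4, .stack⟩, ?_, Nat.le_refl _, Nat.le_refl _⟩
  rw [stackObjs_cons]
  apply List.mem_append_left
  apply List.mem_append_left
  unfold FrameLayout.objsAt Vorbis.Frames.vorbis_pump_first_frame
  simp only [List.map_cons, List.mem_cons, true_or]

/-- `right` (base + 48, 4 bytes) is a live object of the frame list with the function's own frame in front. -/
theorem live_right (others : List Obj) (frames : List (Nat × FrameLayout)) (base : Nat) :
    LiveIn others ((base, Vorbis.Frames.vorbis_pump_first_frame) :: frames) (base + 48) 4 := by
  refine ⟨⟨base + 48, 4, .stack⟩, ?_, Nat.le_refl _, Nat.le_refl _⟩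
  rw [stackObjs_cons]
  apply List.mem_append_left
  apply List.mem_append_left
  unfold FrameLayout.objsAt Vorbis.Frames.vorbis_pump_first_frame
  simp only [List.map_cons, List.mem_cons, true_or, or_true]

/-- `left` (base + 64, 4 bytes) is a live object of the frame list with the function's own frame in front. -/
theorem live_left (others : List Obj) (frames : List (Nat × FrameLayout)) (base : Nat) :
    LiveIn others ((base, Vorbis.Frames.vorbis_pump_first_frame) :: frames) (base + 64) 4 := by
  refine ⟨⟨base + 64, 4, .stack⟩, ?_, Nat.le_refl _, Nat.le_refl _⟩
  rw [stackObjs_cons]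
  apply List.mem_append_left
  apply List.mem_append_left
  unfold FrameLayout.objsAt Vorbis.Frames.vorbis_pump_first_frame
  simp only [List.map_cons, List.mem_cons, true_or, or_true]

/-! ### The epilogue: the function's postcondition -/

/-- **THE POSTCONDITION from the state before the epilogue** (0x1138a4: both paths): the shadow layer and the decode-time
invariant hold for the frame list with the function's own frame in front, in the memory `mem`; after the two shadow stores of
the epilogue they hold for the callers' frame list, the clean stack ending at `RA + 8`. -/
theorem epilogue_post {others : List Obj} {frames : List (Nat × FrameLayout)} {len : Nat} {A : Arena} {stored room : Int}
    {ysz : Nat → Nat} {mem : Mem} {sp b : Word} {f top' : Nat} (hb : IsBase sp b) (hb1 : 0xE0000 ≤ b.toNat)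
    (hb2 : b.toNat < 0x100000)
    (hinv : ShadowInv others ((sp.toNat - 120, Vorbis.Frames.vorbis_pump_first_frame) :: frames) top' mem)
    (hdec : DecodeInv others ((sp.toNat - 120, Vorbis.Frames.vorbis_pump_first_frame) :: frames) len A stored room ysz
      mem f)
    (hroom : 0x700000 + 4176 ≤ sp.toNat) (h8 : sp.toNat % 8 = 0) (hhi : sp.toNat + 8 ≤ 0x800000)
    (hfr : ∀ bF, bF ∈ frames → sp.toNat + 8 ≤ bF.1) :
    ShadowInv others frames (sp.toNat + 8) ((mem.writeLE (b + 12582912) 8 0).writeLE (b + 12582920) 4 0) ∧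
      DecodeInv others frames len A stored room ysz ((mem.writeLE (b + 12582912) 8 0).writeLE (b + 12582920) 4 0) f := by
  have h1 := epilogue_inv hb hinv hroom h8 hhi hfr
  refine ⟨h1, carry_stack_shadow (lo := 0x700000) (hi := 0x700000) hdec hinv (Nat.le_refl _) (by omega) ?_ h1⟩
  clear hb hinv hdec h1 hfr
  u_same

/-! ### The arguments of vorbis_finish_frame -/

/-- The signed value of a register loaded by `mov r32, [a]` is the `int` at `a`. -/
theorem s32_load (M : Mem) (a : Word) : s32 (Word.ofBV (BitVec.ofNat 32 (M.readLE a 4))) = M.i32 a.toNat := by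
  have hlt : M.readLE a 4 < 256 ^ 4 := Mem.readLE_lt' M a 4
  rw [s32_eq_argInt, argInt_def, Vorbis.toNat_ofBV32, BitVec.toNat_ofNat, Mem.i32_def]
  unfold Mem.u32
  rw [addr_toNat, Nat.mod_mod, Nat.mod_eq_of_lt (by omega)]

/-- `test eax, eax ; jne`: the taken arm's condition says the `int` result is not 0. -/
theorem s32_ne_zero (z : Word) (h : ¬ (Word.part .w32 z).toNat = 0) : s32 z ≠ 0 := by
  intro h0
  have e := BitVec.toInt_eq_toNat_cond (Word.part .w32 z)
  have hlt := (Word.part .w32 z).isLt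
  have h0' : (Word.part .w32 z).toInt = 0 := h0
  rw [h0'] at e
  simp only [Width.bits] at e hlt
  split at e <;> omega

/-- **vorbis_finish_frame's W3′ at its call site** (0x1138d3): W3 about the three frame objects (vorbis_decode_packet's post)
is W3′ about the three values loaded from them; `blocksize_1` is read in the memory after the `call` pushed its return address
(off `*f`, which lies off the stack region). -/
theorem finish_pre {others : List Obj} {frames : List (Nat × FrameLayout)} {len : Nat} {A : Arena} {stored room : Int}
    {ysz : Nat → Nat} {M : Mem} {f : Nat} {sp : Word} (ra : Nat) (hroom : 0x700000 + 4176 ≤ sp.toNat)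
    (hhi : sp.toNat + 8 ≤ 0x800000) (hdec : DecodeInv others frames len A stored room ysz M f)
    (h : Top.W3Mem M f (sp - 88).toNat (sp - 56).toNat (sp - 72).toNat) :
    FinishPre (stb_vorbis.blocksize_1 (M.writeLE (sp - 128) 8 ra) f)
      (s32 (Word.ofBV (BitVec.ofNat 32 (M.readLE (sp - 88) 4))))
      (s32 (Word.ofBV (BitVec.ofNat 32 (M.readLE (sp - 56) 4))))
      (s32 (Word.ofBV (BitVec.ofNat 32 (M.readLE (sp - 72) 4)))) := by
  have h3 : W3At M f (sp - 88).toNat (sp - 56).toNat (sp - 72).toNat := h.w3At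
  have hf := hdec.objOff
  have hf2 := (hdec.ok.inside _ hdec.ob1).2
  unfold W3At at h3
  rw [s32_load, s32_load, s32_load]
  simp only [vacc, voff, vblock] at h3 hf hf2 ⊢
  rw [Mem.i32_writeLE M (sp - 128) 8 ra (f + 156) (by u_omega) (by omega) (by u_omega)]
  exact h3

end Vorbis.Spec.vorbis_pump_first_frame
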